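-- pv_equiv track=rewrite | github.com/Ibonarambarri/Math_evaluator-Demo | main.py | Paren_evaluate
-- ===== SOURCE A (Python) =====
-- def spaces(string): #quita lso espacion del estrin
--     evaluation = ""
--     for carac in string:
--         if carac != " ":
--             evaluation = evaluation + carac
--     return evaluation
--
-- def Paren_evaluate(string,a,b): # evalua los parentesis del estrin separando todo en lista y genera un mapa de prioridades para luedo hacer bien el calculo
--     string = spaces(string)
--     evaluated_string = ""
--     evaluation = []
--     pos_prioritis = []
--     op = False
--     for carac in string:
--         if carac == a or carac == b:
--             if op == False:
--                 evaluation.append(evaluated_string)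
--                 evaluated_string = ""
--                 pos_prioritis.append(1)
--                 op = True
--             else:
--                 evaluation.append(evaluated_string)
--                 evaluated_string = ""
--                 pos_prioritis.append(2)
--                 op = False
--         else:
--             evaluated_string = evaluated_string + carac
--     evaluation.append(evaluated_string)
--     pos_prioritis.append(1)
--     return evaluation,pos_prioritis
-- ===== SOURCE B (Python) =====
-- def Paren_evaluate(string, a, b):
--     # Split-then-map decomposition: clean the string once, split it on each
--     # single-character delimiter, then derive the priority list from token index parity.
--     s = string.replace(" ", "")
--     tokens = [s]
--     for d in (a, b):
--         if len(d) == 1: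
--             tokens = [piece for t in tokens for piece in t.split(d)]
--     pos_prioritis = [1 if i % 2 == 0 else 2 for i in range(len(tokens) - 1)] + [1]
--     return tokens, pos_prioritis
-- ===== Notes on version B (the rewrite author's own statement) =====
-- stated objective: simpler
-- what changed: A's single stateful scan with a quadratic string accumulator and an op toggle is replaced by a split-then-map decomposition: clean the string with str.replace, split it on each single-character delimiter with str.split, and derive the priority list from token index parity.
import Mathlib
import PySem

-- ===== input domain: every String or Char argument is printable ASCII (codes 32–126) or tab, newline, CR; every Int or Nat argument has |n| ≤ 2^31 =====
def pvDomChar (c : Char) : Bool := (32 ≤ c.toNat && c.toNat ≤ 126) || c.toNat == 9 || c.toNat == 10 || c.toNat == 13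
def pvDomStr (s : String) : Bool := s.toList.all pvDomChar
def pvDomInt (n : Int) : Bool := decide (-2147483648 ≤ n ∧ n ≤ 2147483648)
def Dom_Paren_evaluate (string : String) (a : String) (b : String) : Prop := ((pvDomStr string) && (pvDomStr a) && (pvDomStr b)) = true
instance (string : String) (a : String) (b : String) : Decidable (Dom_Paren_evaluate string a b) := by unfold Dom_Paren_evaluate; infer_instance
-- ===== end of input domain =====

-- B replaces A's stateful toggle-scan by a split-then-index-parity decomposition (objective: simpler); same return values everywhere.


-- ===== PORT A =====
-- helper `spaces`: builds the string character by character, skipping ' '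
def pvSpacesA : List Char → List Char
  | [] => []
  | c :: cs => if c ≠ ' ' then c :: pvSpacesA cs else pvSpacesA cs

-- A's main loop: state (evaluated_string, evaluation, pos_prioritis, op), final appends in the base case
def pvLoopA (d : Char → Bool) : List Char → List Char → List String → List Int → Bool → List String × List Int
  | [], ev, evl, pos, _ => (evl ++ [String.ofList ev], pos ++ [(1 : Int)])
  | c :: cs, ev, evl, pos, op =>
      if d c then
        if op = false then pvLoopA d cs [] (evl ++ [String.ofList ev]) (pos ++ [(1 : Int)]) true
        else pvLoopA d cs [] (evl ++ [String.ofList ev]) (pos ++ [(2 : Int)]) false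
      else pvLoopA d cs (ev ++ [c]) evl pos op

def Paren_evaluate (string : String) (a : String) (b : String) : List String × List Int :=
  -- `carac == a or carac == b` compares the 1-char string `carac` with a and b
  pvLoopA (fun c => a.toList == [c] || b.toList == [c]) (pvSpacesA string.toList) [] [] [] false

-- ===== PORT B =====
-- loop body of Source B's `for d in (a, b)`: if len(d) == 1: tokens = [piece for t in tokens for piece in t.split(d)]
def pvSplitStep (dstr : String) (ts : List (List Char)) : List (List Char) :=
  if dstr.toList.length = 1 then ts.flatMap (fun t => PySem.Chars.splitOn t dstr.toList) else ts

def Paren_evaluate_alt (string : String) (a : String) (b : String) : List String × List Int :=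
  let s := PySem.Chars.replace string.toList [' '] []          -- string.replace(" ", "")
  let t2 := pvSplitStep b (pvSplitStep a [s])
  (t2.map String.ofList,
   (List.range (t2.length - 1)).map (fun i => if i % 2 = 0 then (1 : Int) else 2) ++ [(1 : Int)])

-- ===== PRECONDITION & SPEC =====
def Spec_Paren_evaluate (string : String) (a : String) (b : String) (out : List String × List Int) : Prop := out = Paren_evaluate_alt string a b
instance (string : String) (a : String) (b : String) (out : List String × List Int) : Decidable (Spec_Paren_evaluate string a b out) := by unfold Spec_Paren_evaluate; infer_instance

-- ===== CLAIM (what is proved, stated in full; the proofs are below) =====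
def Claim_equal_Paren_evaluate : Prop := ∀ (string : String) (a : String) (b : String), Dom_Paren_evaluate string a b → Spec_Paren_evaluate string a b (Paren_evaluate string a b)

-- ===== LEMMAS AND PROOFS =====

-- reference splitter: (first token, remaining tokens)
def pvSplitP (d : Char → Bool) : List Char → List Char × List (List Char)
  | [] => ([], [])
  | c :: cs => let r := pvSplitP d cs; if d c then ([], r.1 :: r.2) else (c :: r.1, r.2)

def pvParts (d : Char → Bool) (l : List Char) : List (List Char) :=
  (pvSplitP d l).1 :: (pvSplitP d l).2

def pvPrio : Bool → Nat → List Int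
  | _, 0 => []
  | false, n + 1 => 1 :: pvPrio true n
  | true, n + 1 => 2 :: pvPrio false n

theorem pvParts_cons_true {d : Char → Bool} {c : Char} (cs : List Char) (h : d c = true) :
    pvParts d (c :: cs) = [] :: pvParts d cs := by
  simp [pvParts, pvSplitP, h]

theorem pvParts_cons_false {d : Char → Bool} {c : Char} (cs : List Char) (h : d c = false) :
    pvParts d (c :: cs) = (c :: (pvSplitP d cs).1) :: (pvSplitP d cs).2 := by
  simp [pvParts, pvSplitP, h]

theorem pvSplitP_congr (d d' : Char → Bool) (h : ∀ c, d c = d' c) :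
    ∀ l, pvSplitP d l = pvSplitP d' l := by
  intro l
  induction l with
  | nil => rfl
  | cons c cs ih => simp [pvSplitP, h c, ih]

theorem pvSplitP_false : ∀ l, pvSplitP (fun _ => false) l = (l, []) := by
  intro l
  induction l with
  | nil => rfl
  | cons c cs ih => simp [pvSplitP, ih]

-- A's loop computes pvParts plus the alternating priorities
theorem pvLoopA_eq (d : Char → Bool) :
    ∀ (l ev : List Char) (evl : List String) (pos : List Int) (op : Bool),
      pvLoopA d l ev evl pos op =
        (evl ++ (String.ofList (ev ++ (pvSplitP d l).1) :: (pvSplitP d l).2.map String.ofList),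
         pos ++ pvPrio op (pvSplitP d l).2.length ++ [1]) := by
  intro l
  induction l with
  | nil => intro ev evl pos op; simp [pvLoopA, pvSplitP, pvPrio]
  | cons c cs ih =>
    intro ev evl pos op
    by_cases h : d c = true
    · cases op <;> simp [pvLoopA, h, ih, pvSplitP, pvPrio]
    · simp at h
      simp [pvLoopA, h, ih, pvSplitP]

-- replace.go with old = [' '], new = [] is exactly `spaces`
theorem pvReplaceGo_spaces : ∀ (l : List Char) (fuel : Nat) (acc : List Char),
    l.length ≤ fuel →
    PySem.Chars.replace.go [' '] [] fuel l acc = acc.reverse ++ pvSpacesA l := by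
  intro l
  induction l with
  | nil => intro fuel acc _; cases fuel <;> simp [PySem.Chars.replace.go, pvSpacesA]
  | cons c cs ih =>
    intro fuel acc hlen
    cases fuel with
    | zero => simp at hlen
    | succ f =>
      simp only [List.length_cons, Nat.add_le_add_iff_right] at hlen
      by_cases h : ' ' = c
      · simp [PySem.Chars.replace.go, List.isPrefixOf, ih f _ hlen, pvSpacesA, ← h]
      · simp [PySem.Chars.replace.go, List.isPrefixOf, h, ih f _ hlen, pvSpacesA, Ne.symm h]

theorem pvReplace_spaces (l : List Char) :
    PySem.Chars.replace l [' '] [] = pvSpacesA l := by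
  simpa [PySem.Chars.replace] using pvReplaceGo_spaces l l.length [] le_rfl

-- splitOn with a single-character separator is pvParts
theorem pvSplitOnGo_single (x : Char) :
    ∀ (l : List Char) (fuel : Nat) (cur : List Char) (acc : List (List Char)),
      l.length ≤ fuel →
      PySem.Chars.splitOn.go [x] fuel l cur acc =
        acc.reverse ++ (cur.reverse ++ (pvSplitP (fun c => x == c) l).1) ::
          (pvSplitP (fun c => x == c) l).2 := by
  intro l
  induction l with
  | nil => intro fuel cur acc _; cases fuel <;> simp [PySem.Chars.splitOn.go, pvSplitP]
  | cons c cs ih =>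
    intro fuel cur acc hlen
    cases fuel with
    | zero => simp at hlen
    | succ f =>
      simp only [List.length_cons, Nat.add_le_add_iff_right] at hlen
      by_cases h : x = c
      · subst h
        rw [show PySem.Chars.splitOn.go [x] (f + 1) (x :: cs) cur acc
              = PySem.Chars.splitOn.go [x] f cs [] (cur.reverse :: acc) from by
            simp [PySem.Chars.splitOn.go, List.isPrefixOf]]
        rw [ih f [] (cur.reverse :: acc) hlen]
        simp [pvSplitP]
      · rw [show PySem.Chars.splitOn.go [x] (f + 1) (c :: cs) cur acc
              = PySem.Chars.splitOn.go [x] f cs (c :: cur) acc from by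
            simp [PySem.Chars.splitOn.go, List.isPrefixOf, h]]
        rw [ih f _ _ hlen]
        simp [pvSplitP, h]

theorem pvSplitOn_single (x : Char) (l : List Char) :
    PySem.Chars.splitOn l [x] = pvParts (fun c => x == c) l := by
  simpa [PySem.Chars.splitOn, pvParts] using pvSplitOnGo_single x l (l.length + 1) [] [] (by omega)

-- splitting on da then on db = splitting on their union
theorem pvParts_comp (da db : Char → Bool) :
    ∀ l, (pvParts da l).flatMap (pvParts db) = pvParts (fun c => da c || db c) l := by
  intro l
  induction l with
  | nil => simp [pvParts, pvSplitP]
  | cons c cs ih =>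
    by_cases ha : da c = true
    · rw [pvParts_cons_true cs ha, pvParts_cons_true cs (by simp [ha])]
      simp only [List.flatMap_cons] at ih ⊢
      simpa [pvParts, pvSplitP] using ih
    · simp at ha
      rw [pvParts_cons_false cs ha]
      by_cases hb : db c = true
      · rw [pvParts_cons_true cs (c := c) (d := fun c => da c || db c) (by simp [ha, hb])]
        rw [← ih]
        simp only [pvParts, List.flatMap_cons]
        simp [pvSplitP, hb]
      · simp at hb
        rw [pvParts_cons_false cs (c := c) (d := fun c => da c || db c) (by simp [ha, hb])]
        have hthis := ih
        simp only [pvParts, List.flatMap_cons] at hthis ⊢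
        simp only [List.cons_append, List.cons.injEq] at hthis
        obtain ⟨e1, e2⟩ := hthis
        simp [pvSplitP, hb, e1, e2]

-- alternating priorities as an index-parity map
theorem pvPrio_eq_map : ∀ (n : Nat) (bp : Bool),
    pvPrio bp n = (List.range n).map (fun i => if (i + cond bp 1 0) % 2 = 0 then (1 : Int) else 2) := by
  intro n
  induction n with
  | zero => intro bp; simp [pvPrio]
  | succ m ih =>
    intro bp
    rw [List.range_succ_eq_map]
    cases bp <;>
      simp [pvPrio, ih, List.map_map, Function.comp_def, Nat.add_mod_right,
        show ∀ i : Nat, i + 1 + 1 = i + 2 from fun i => rfl]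

-- singleton-list Bool equality
theorem pvBeq_single (x c : Char) : (([x] : List Char) == [c]) = (x == c) := by
  by_cases h : x = c <;> simp [h]

-- non-singleton delimiter never matches
theorem pvBeq_not_single (a : String) (h : a.toList.length ≠ 1) (c : Char) :
    (a.toList == [c]) = false := by
  rcases hb : a.toList == [c] with _ | _
  · rfl
  · exact absurd (by rw [(beq_iff_eq).mp hb]; rfl) h

theorem pvStep_eq (dstr : String) (ts : List (List Char)) :
    pvSplitStep dstr ts = ts.flatMap (pvParts (fun c => dstr.toList == [c])) := by
  unfold pvSplitStep
  by_cases h : dstr.toList.length = 1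
  · obtain ⟨x, hx⟩ := List.length_eq_one_iff.mp h
    rw [if_pos h]
    apply List.flatMap_congr
    intro t _
    rw [hx, pvSplitOn_single x t]
    exact congrFun (congrArg pvParts (funext fun c => (pvBeq_single x c).symm)) t
  · rw [if_neg h]
    have : ∀ t : List Char, pvParts (fun c => dstr.toList == [c]) t = [t] := by
      intro t
      unfold pvParts
      rw [pvSplitP_congr _ (fun _ => false) (fun c => pvBeq_not_single dstr h c), pvSplitP_false]
    conv_rhs => rw [show (pvParts fun c => dstr.toList == [c]) = (fun t => [t]) from funext this]
    simp

-- ===== VERDICT (by name: the statement is the Claim_ definition above) =====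
theorem Paren_evaluate_spec : Claim_equal_Paren_evaluate := by
  intro string a b _
  unfold Spec_Paren_evaluate Paren_evaluate Paren_evaluate_alt
  rw [pvLoopA_eq]
  simp only [pvReplace_spaces, pvStep_eq, List.flatMap_cons, List.flatMap_nil, List.append_nil,
    pvParts_comp]
  unfold pvParts
  rw [pvPrio_eq_map]
  simp
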